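-- pv_equiv track=rewrite | github.com/Tianmingla/12306 | DataScript/generate_seats_and_carriages.py | generate_seat_numbers
-- ===== SOURCE A (Python) =====
-- def generate_seat_numbers(seat_type, total_seats):
--     """
--     根据座位类型生成符合铁路规范的座位号列表
--     :param seat_type: 0=硬座, 1=二等座, 2=一等座, 3=商务座
--     :param total_seats: 该车厢总座位数
--     :return: list of seat numbers (e.g., ['01A', '01B', ...])
--     """
--     seat_numbers = []
--
--     if seat_type == 0:  # 硬座：纯数字，001 ~ total_seats
--         for i in range(1, total_seats + 1):
--             seat_numbers.append(f"{i:03d}")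
--         return seat_numbers
--
--     # 动车/高铁类座位（带字母）
--     layout_map = {
--         1: ['A', 'B', 'C', 'D', 'F'],  # 二等座，5座
--         2: ['A', 'C', 'D', 'F'],       # 一等座，4座
--         3: ['A', 'C', 'F'],            # 商务座，3座
--     }
--
--     if seat_type not in layout_map:
--         # 未知类型 fallback 到硬座
--         for i in range(1, total_seats + 1):
--             seat_numbers.append(f"{i:03d}")
--         return seat_numbers
--
--     letters = layout_map[seat_type]
--     seats_per_row = len(letters)
--
--     row = 1
--     generated = 0
--     while generated < total_seats:
--         for letter in letters:
--             if generated >= total_seats: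
--                 break
--             seat_numbers.append(f"{row:02d}{letter}")
--             generated += 1
--         row += 1
--
--     return seat_numbers
-- ===== SOURCE B (Python) =====
-- def generate_seat_numbers(seat_type, total_seats):
--     layout_map = {1: "ABCDF", 2: "ACDF", 3: "ACF"}
--     letters = layout_map.get(seat_type)
--     if letters is None:
--         return [f"{i:03d}" for i in range(1, total_seats + 1)]
--     n = len(letters)
--     return [f"{i // n + 1:02d}{letters[i % n]}" for i in range(total_seats)]
-- ===== Notes on version B (the rewrite author's own statement) =====
-- stated objective: simpler
-- what changed: Replaced A's nested while/for loop with manual row and generated counters by a single flat loop over range(total_seats) computing each seat's row and letter with divmod index arithmetic (and folded the seat_type==0 and unknown-type branches into one dict.get fallback).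
import Mathlib
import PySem

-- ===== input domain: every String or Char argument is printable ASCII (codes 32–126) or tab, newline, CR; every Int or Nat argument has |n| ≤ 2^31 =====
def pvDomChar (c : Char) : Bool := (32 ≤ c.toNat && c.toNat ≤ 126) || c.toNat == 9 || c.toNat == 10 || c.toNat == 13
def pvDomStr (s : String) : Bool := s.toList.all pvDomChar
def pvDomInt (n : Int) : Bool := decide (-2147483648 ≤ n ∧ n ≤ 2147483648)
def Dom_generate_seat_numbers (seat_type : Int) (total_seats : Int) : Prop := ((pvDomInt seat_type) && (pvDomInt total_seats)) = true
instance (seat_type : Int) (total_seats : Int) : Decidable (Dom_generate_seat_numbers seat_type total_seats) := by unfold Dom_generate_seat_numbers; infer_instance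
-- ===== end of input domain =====

-- B replaces A's nested while/for with a manual row/generated counter by a single flat
-- loop over range(total_seats) using divmod index arithmetic (objective: simpler).

-- f"{i:0kd}" = str(i).zfill(k); PySem.Str.zfill is exact (sign stays in front)
def pvFmt (i : Int) (w : Nat) : String := PySem.Str.zfill (PySem.Int.toStr i) w

-- ===== PORT A =====
-- inner 'for letter in letters: if generated >= total: break; append; generated += 1'
def pvAInner (total row : Int) : List Char → Int → List String → Int × List String
  | [], gen, acc => (gen, acc)
  | c :: cs, gen, acc =>
    if gen ≥ total then (gen, acc)
    else pvAInner total row cs (gen + 1) (acc ++ [pvFmt row 2 ++ String.mk [c]])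

-- outer 'while generated < total_seats'; fuel ≥ total - generated suffices (each
-- iteration increases 'generated', letters being nonempty at every call site)
def pvAWhile (letters : List Char) (total : Int) : Nat → Int → Int → List String → List String
  | 0, _, _, acc => acc
  | fuel + 1, row, gen, acc =>
    if gen < total then
      let p := pvAInner total row letters gen acc
      pvAWhile letters total fuel (row + 1) p.1 p.2
    else acc

def generate_seat_numbers (seat_type : Int) (total_seats : Int) : List String :=
  if seat_type = 0 then
    (PySem.List.pyRange 1 (total_seats + 1) 1).map (fun i => pvFmt i 3)
  else
    let layout_map : PySem.Dict Int (List Char) :=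
      PySem.Dict.ofList [(1, ['A','B','C','D','F']), (2, ['A','C','D','F']), (3, ['A','C','F'])]
    match PySem.Dict.get? layout_map seat_type with
    | none => (PySem.List.pyRange 1 (total_seats + 1) 1).map (fun i => pvFmt i 3)
    | some letters => pvAWhile letters total_seats total_seats.toNat 1 0 []

-- ===== PORT B =====
def generate_seat_numbers_alt (seat_type : Int) (total_seats : Int) : List String :=
  let layout_map : PySem.Dict Int (List Char) :=
    PySem.Dict.ofList [(1, ['A','B','C','D','F']), (2, ['A','C','D','F']), (3, ['A','C','F'])]
  match PySem.Dict.get? layout_map seat_type with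
  | none => (PySem.List.pyRange 1 (total_seats + 1) 1).map (fun i => pvFmt i 3)
  | some letters =>
    let n : Int := letters.length
    (PySem.List.pyRange 0 total_seats 1).map (fun i =>
      pvFmt (PySem.Int.floordiv i n + 1) 2 ++
        String.mk [PySem.List.pyGetD letters (PySem.Int.mod i n) ' '])

-- ===== PRECONDITION & SPEC =====
def Spec_generate_seat_numbers (seat_type : Int) (total_seats : Int) (out : List String) : Prop := out = generate_seat_numbers_alt seat_type total_seats
instance (seat_type : Int) (total_seats : Int) (out : List String) : Decidable (Spec_generate_seat_numbers seat_type total_seats out) := by unfold Spec_generate_seat_numbers; infer_instance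

-- ===== CLAIM (what is proved, stated in full; the proofs are below) =====
def Claim_equal_generate_seat_numbers : Prop := ∀ (seat_type : Int) (total_seats : Int), Dom_generate_seat_numbers seat_type total_seats → Spec_generate_seat_numbers seat_type total_seats (generate_seat_numbers seat_type total_seats)

-- ===== LEMMAS AND PROOFS =====

-- the inner for-loop appends one formatted seat per letter until 'generated' hits total
theorem pvAInner_eq (total row : Int) (cs : List Char) (gen : Int) (acc : List String)
    (hgen : gen ≤ total) :
    pvAInner total row cs gen acc =
      (gen + min (cs.length : Int) (total - gen),
       acc ++ (cs.take (min cs.length (total - gen).toNat)).map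
         (fun c => pvFmt row 2 ++ String.mk [c])) := by
  induction cs generalizing gen acc with
  | nil => simp [pvAInner]; omega
  | cons c cs ih =>
    simp only [pvAInner]
    by_cases h : gen ≥ total
    · have h1 : min ((c :: cs).length : Int) (total - gen) = 0 := by simp; omega
      have h2 : min (c :: cs).length (total - gen).toNat = 0 := by simp; omega
      simp [h, h1, h2]; omega
    · rw [if_neg h, ih (gen + 1) _ (by omega)]
      have h2 : min (c :: cs).length (total - gen).toNat
          = min cs.length (total - (gen + 1)).toNat + 1 := by simp; omega
      rw [Prod.mk.injEq]
      refine ⟨by simp; omega, ?_⟩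
      rw [h2]; simp [List.take_succ_cons]

theorem pvAWhile_eq (letters : List Char) (hne : letters ≠ []) (total : Int)
    (fuel : Nat) (row gen : Int) (acc : List String)
    (hrow : 1 ≤ row) (halign : gen = (row - 1) * (letters.length : Int))
    (hfuel : (total - gen).toNat ≤ fuel) :
    pvAWhile letters total fuel row gen acc =
      acc ++ (PySem.List.pyRange gen total 1).map (fun i =>
        pvFmt (PySem.Int.floordiv i (letters.length : Int) + 1) 2 ++
          String.mk [PySem.List.pyGetD letters (PySem.Int.mod i (letters.length : Int)) ' ']) := by
  induction fuel generalizing row gen acc with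
  | zero =>
    have : ¬ gen < total := by omega
    simp [pvAWhile, PySem.List.pyRange_one]
    omega
  | succ fuel ih =>
    set n : Int := (letters.length : Int) with hn
    have hnpos : 0 < n := by
      simp [hn]; cases letters with | nil => exact absurd rfl hne | cons _ _ => simp
    by_cases hlt : gen < total
    · rw [pvAWhile, if_pos hlt, pvAInner_eq total row letters gen acc (by omega)]
      set m : Nat := min letters.length (total - gen).toNat with hm
      have hmn : (min (n : Int) (total - gen)) = (m : Int) := by omega
      have hmpos : 0 < m := by omega
      have hgen' : gen + (m : Int) ≤ total := by omega
      rw [hmn]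
      show pvAWhile letters total fuel (row + 1) (gen + (m : Int))
          (acc ++ (letters.take m).map (fun c => pvFmt row 2 ++ String.mk [c])) = _
      -- value of the flat-loop body at index gen + j, 0 ≤ j < m
      have hbody : ∀ (j : Nat), j < m →
          (pvFmt (PySem.Int.floordiv (gen + (j : Int)) n + 1) 2 ++
            String.mk [PySem.List.pyGetD letters (PySem.Int.mod (gen + (j : Int)) n) ' '])
          = pvFmt row 2 ++ String.mk [letters[j]!] := by
        intro j hj
        have hjn : (j : Int) < n := by omega
        have hdiv : PySem.Int.floordiv (gen + (j : Int)) n = row - 1 := by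
          rw [PySem.Int.floordiv_eq_iff_of_pos hnpos]
          constructor <;> nlinarith [halign]
        have hmod : PySem.Int.mod (gen + (j : Int)) n = (j : Int) := by
          have := PySem.Int.floordiv_mul_add_mod (gen + (j : Int)) n
          rw [hdiv] at this
          nlinarith [halign]
        rw [hdiv, hmod]
        have hjl : j < letters.length := by omega
        rw [PySem.List.pyGetD_natCast]
        congr 2
        · omega
        · simp [List.getD, List.getElem?_eq_getElem hjl, getElem!_pos]
      -- split the flat range at gen + m
      have hsplit : (PySem.List.pyRange gen total 1) =
          (List.range m).map (fun j : Nat => gen + (j : Int)) ++ PySem.List.pyRange (gen + m) total 1 := by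
        rw [PySem.List.pyRange_one, PySem.List.pyRange_one]
        have hT : (total - gen).toNat = m + (total - (gen + m)).toNat := by omega
        rw [hT, List.range_add, List.map_append, List.map_map]
        refine congrArg₂ (· ++ ·) rfl ?_
        apply List.map_congr_left
        intro j hj
        simp
        omega
      rw [hsplit, List.map_append]
      have hchunk : (((List.range m).map (fun j : Nat => gen + (j : Int))).map
          (fun i => pvFmt (PySem.Int.floordiv i n + 1) 2 ++
            String.mk [PySem.List.pyGetD letters (PySem.Int.mod i n) ' ']))
          = (letters.take m).map (fun c => pvFmt row 2 ++ String.mk [c]) := by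
        rw [List.map_map]
        apply List.ext_getElem
        · simp; omega
        · intro k h1 h2
          simp only [List.getElem_map, List.getElem_range, List.getElem_take, Function.comp]
          have hk : k < m := by simpa using h1
          rw [hbody k hk]
          congr 1
          rw [getElem!_pos]
      rw [hchunk]
      by_cases hend : gen + (m : Int) = total
      · -- loop terminates: next outer check fails, remaining range empty
        have hre : PySem.List.pyRange (gen + (m : Int)) total 1 = [] := by
          rw [PySem.List.pyRange_one]
          have : (total - (gen + (m : Int))).toNat = 0 := by omega
          simp [this]
        cases fuel with
        | zero => simp [pvAWhile, hre]
        | succ f =>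
          rw [pvAWhile, if_neg (by omega)]
          simp [hre]
      · -- full row consumed: m = letters.length, alignment carries to row + 1
        have hmfull : m = letters.length := by omega
        rw [ih (row + 1) (gen + m) _ (by omega) (by rw [halign, hmfull, hn]; ring) (by omega)]
        simp
    · have : PySem.List.pyRange gen total 1 = [] := by
        rw [PySem.List.pyRange_one]
        have : (total - gen).toNat = 0 := by omega
        simp [this]
      simp [pvAWhile, hlt, this]

-- ===== VERDICT (by name: the statement is the Claim_ definition above) =====
theorem generate_seat_numbers_spec : Claim_equal_generate_seat_numbers := by
  intro st ts _
  unfold Spec_generate_seat_numbers generate_seat_numbers generate_seat_numbers_alt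
  by_cases h1 : st = 1
  · subst h1
    have hd : PySem.Dict.get? (PySem.Dict.ofList [((1:Int), (['A','B','C','D','F'] : List Char)), (2, ['A','C','D','F']), (3, ['A','C','F'])]) 1 = some ['A','B','C','D','F'] := by decide
    simp only [hd, if_neg (by norm_num : (1:Int) ≠ 0)]
    rw [pvAWhile_eq _ (by simp) ts ts.toNat 1 0 [] (by omega) (by simp) (by omega)]
    simp
  by_cases h2 : st = 2
  · subst h2
    have hd : PySem.Dict.get? (PySem.Dict.ofList [((1:Int), (['A','B','C','D','F'] : List Char)), (2, ['A','C','D','F']), (3, ['A','C','F'])]) 2 = some ['A','C','D','F'] := by decide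
    simp only [hd, if_neg (by norm_num : (2:Int) ≠ 0)]
    rw [pvAWhile_eq _ (by simp) ts ts.toNat 1 0 [] (by omega) (by simp) (by omega)]
    simp
  by_cases h3 : st = 3
  · subst h3
    have hd : PySem.Dict.get? (PySem.Dict.ofList [((1:Int), (['A','B','C','D','F'] : List Char)), (2, ['A','C','D','F']), (3, ['A','C','F'])]) 3 = some ['A','C','F'] := by decide
    simp only [hd, if_neg (by norm_num : (3:Int) ≠ 0)]
    rw [pvAWhile_eq _ (by simp) ts ts.toNat 1 0 [] (by omega) (by simp) (by omega)]
    simp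
  · -- st not a lettered type: both A and B fall back to the numeric list
    have hmk : (PySem.Dict.ofList [((1:Int), (['A','B','C','D','F'] : List Char)), (2, ['A','C','D','F']), (3, ['A','C','F'])]) = PySem.Dict.mk [((1:Int), (['A','B','C','D','F'] : List Char)), (2, ['A','C','D','F']), (3, ['A','C','F'])] := by decide
    have hd : PySem.Dict.get? (PySem.Dict.ofList [((1:Int), (['A','B','C','D','F'] : List Char)), (2, ['A','C','D','F']), (3, ['A','C','F'])]) st = none := by
      rw [hmk, PySem.Dict.get?_mk_cons, PySem.Dict.get?_mk_cons, PySem.Dict.get?_mk_cons]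
      have b1 : ((1:Int) == st) = false := by simp [beq_iff_eq]; omega
      have b2 : ((2:Int) == st) = false := by simp [beq_iff_eq]; omega
      have b3 : ((3:Int) == st) = false := by simp [beq_iff_eq]; omega
      simp [b1, b2, b3, PySem.Dict.get?]
    simp only [hd]
    by_cases h0 : st = 0 <;> simp [h0]
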